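-- pv_equiv track=rewrite | github.com/arthur-liu-lsh/aoc2023 | d11.py | domain_expansion
-- ===== SOURCE A (Python) =====
-- def domain_expansion(galaxies, to_expand_vertical, to_expand_horizontal, expand_size):
--     expand_sizes_vertical = [0 for _ in galaxies]
--     expand_sizes_horizontal = [0 for _ in galaxies]
--     for elem in to_expand_vertical:
--         for k in range(len(galaxies)):
--             i, j = galaxies[k]
--             if i > elem:
--                 expand_sizes_vertical[k] += expand_size
--     for elem in to_expand_horizontal:
--         for k in range(len(galaxies)):
--             i, j = galaxies[k]
--             if j > elem:
--                 expand_sizes_horizontal[k] += expand_size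
--
--     galaxies_new = []
--
--     for k in range(len(galaxies)):
--         i,j = galaxies[k]
--         i += expand_sizes_vertical[k]
--         j += expand_sizes_horizontal[k]
--         galaxies_new.append((i,j))
--
--     return galaxies_new
-- ===== SOURCE B (Python) =====
-- def _count_less(xs, x):
--     # xs sorted ascending: number of elements < x, by binary search
--     lo, hi = 0, len(xs)
--     while lo < hi:
--         mid = (lo + hi) // 2
--         if xs[mid] < x:
--             lo = mid + 1
--         else:
--             hi = mid
--     return lo
--
-- def domain_expansion(galaxies, to_expand_vertical, to_expand_horizontal, expand_size):
--     sv = sorted(to_expand_vertical)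
--     sh = sorted(to_expand_horizontal)
--     return [(i + expand_size * _count_less(sv, i),
--              j + expand_size * _count_less(sh, j))
--             for i, j in galaxies]
-- ===== Notes on version B (the rewrite author's own statement) =====
-- stated objective: faster
-- what changed: instead of a nested loop adding expand_size per (expansion line, galaxy) pair into mutable offset arrays, B sorts each expansion list once and binary-searches it per galaxy to count lines below/left, computing each new coordinate directly
import Mathlib
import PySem

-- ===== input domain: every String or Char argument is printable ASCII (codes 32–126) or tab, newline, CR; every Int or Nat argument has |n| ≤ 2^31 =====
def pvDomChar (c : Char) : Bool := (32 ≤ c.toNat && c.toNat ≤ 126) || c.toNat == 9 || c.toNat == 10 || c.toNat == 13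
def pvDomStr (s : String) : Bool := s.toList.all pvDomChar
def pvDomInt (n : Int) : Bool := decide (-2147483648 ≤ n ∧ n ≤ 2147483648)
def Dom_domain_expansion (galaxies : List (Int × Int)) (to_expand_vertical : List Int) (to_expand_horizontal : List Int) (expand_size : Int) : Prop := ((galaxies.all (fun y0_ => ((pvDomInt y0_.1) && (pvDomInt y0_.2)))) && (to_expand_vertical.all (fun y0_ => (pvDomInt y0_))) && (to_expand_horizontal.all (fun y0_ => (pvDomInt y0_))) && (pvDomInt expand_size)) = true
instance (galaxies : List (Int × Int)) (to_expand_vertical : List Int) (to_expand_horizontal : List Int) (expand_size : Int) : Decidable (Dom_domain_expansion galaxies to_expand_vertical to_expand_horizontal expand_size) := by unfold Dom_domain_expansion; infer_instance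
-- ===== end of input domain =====

-- B replaces A's nested (expansion line × galaxy) accumulation loops by sorting each
-- expansion list once and binary-searching it per galaxy (objective: faster).


-- ===== PORT A =====
-- one inner 'for k in range(len(galaxies))' accumulation pass (A's two copies differ only
-- in the coordinate selected, passed as `sel`)
def pvAccumPass (galaxies : List (Int × Int)) (sel : (Int × Int) → Int) (expand_size : Int) (sizes : List Int) (elem : Int) : List Int :=
  (PySem.List.pyRange 0 (PySem.List.len galaxies) 1).foldl (fun sz k =>
    if sel (PySem.List.pyGetD galaxies k (0, 0)) > elem then
      PySem.List.pySetD sz k (PySem.List.pyGetD sz k 0 + expand_size)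
    else sz) sizes

def domain_expansion (galaxies : List (Int × Int)) (to_expand_vertical : List Int) (to_expand_horizontal : List Int) (expand_size : Int) : List (Int × Int) :=
  let expand_sizes_vertical0 : List Int := galaxies.map (fun _ => 0)
  let expand_sizes_horizontal0 : List Int := galaxies.map (fun _ => 0)
  let expand_sizes_vertical :=
    to_expand_vertical.foldl (pvAccumPass galaxies (fun g => g.1) expand_size) expand_sizes_vertical0
  let expand_sizes_horizontal :=
    to_expand_horizontal.foldl (pvAccumPass galaxies (fun g => g.2) expand_size) expand_sizes_horizontal0
  (PySem.List.pyRange 0 (PySem.List.len galaxies) 1).foldl (fun acc k =>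
    acc ++ [((PySem.List.pyGetD galaxies k (0, 0)).1 + PySem.List.pyGetD expand_sizes_vertical k 0,
             (PySem.List.pyGetD galaxies k (0, 0)).2 + PySem.List.pyGetD expand_sizes_horizontal k 0)]) []

-- ===== PORT B =====
-- _count_less: binary search (bisect-left style) counting elements < x in a sorted list
-- the while loop, as structural recursion on the fuel hi - lo ≤ xs.length (totality device only)
def pvCountLessGo (xs : List Int) (x : Int) : Nat → Nat → Nat → Nat
  | 0, lo, _ => lo
  | fuel + 1, lo, hi =>
    if lo < hi then
      if xs.getD ((lo + hi) / 2) 0 < x then pvCountLessGo xs x fuel ((lo + hi) / 2 + 1) hi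
      else pvCountLessGo xs x fuel lo ((lo + hi) / 2)
    else lo

def pvCountLess (xs : List Int) (x : Int) : Nat := pvCountLessGo xs x xs.length 0 xs.length

def domain_expansion_alt (galaxies : List (Int × Int)) (to_expand_vertical : List Int) (to_expand_horizontal : List Int) (expand_size : Int) : List (Int × Int) :=
  let sv := PySem.List.sorted to_expand_vertical (fun e => e) false
  let sh := PySem.List.sorted to_expand_horizontal (fun e => e) false
  galaxies.map (fun g =>
    (g.1 + expand_size * (pvCountLess sv g.1 : Int),
     g.2 + expand_size * (pvCountLess sh g.2 : Int)))

-- ===== PRECONDITION & SPEC =====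
def Spec_domain_expansion (galaxies : List (Int × Int)) (to_expand_vertical : List Int) (to_expand_horizontal : List Int) (expand_size : Int) (out : List (Int × Int)) : Prop := out = domain_expansion_alt galaxies to_expand_vertical to_expand_horizontal expand_size
instance (galaxies : List (Int × Int)) (to_expand_vertical : List Int) (to_expand_horizontal : List Int) (expand_size : Int) (out : List (Int × Int)) : Decidable (Spec_domain_expansion galaxies to_expand_vertical to_expand_horizontal expand_size out) := by unfold Spec_domain_expansion; infer_instance

-- ===== CLAIM (what is proved, stated in full; the proofs are below) =====
def Claim_equal_domain_expansion : Prop := ∀ (galaxies : List (Int × Int)) (to_expand_vertical : List Int) (to_expand_horizontal : List Int) (expand_size : Int), Dom_domain_expansion galaxies to_expand_vertical to_expand_horizontal expand_size → Spec_domain_expansion galaxies to_expand_vertical to_expand_horizontal expand_size (domain_expansion galaxies to_expand_vertical to_expand_horizontal expand_size)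

-- ===== LEMMAS AND PROOFS =====

-- binary search: on a sorted list, pvCountLessGo returns a split point r with xs[j] < x iff j < r
theorem pvCountLessGo_spec (xs : List Int) (x : Int) (hs : xs.Pairwise (· ≤ ·)) :
    ∀ (d lo hi : Nat), hi - lo ≤ d → lo ≤ hi → hi ≤ xs.length →
    (∀ j (hj : j < xs.length), j < lo → xs[j] < x) →
    (∀ j (hj : j < xs.length), hi ≤ j → x ≤ xs[j]) →
    pvCountLessGo xs x d lo hi ≤ xs.length ∧
      ∀ j (hj : j < xs.length), (xs[j] < x ↔ j < pvCountLessGo xs x d lo hi) := by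
  have hmono : ∀ (p q : Nat) (hp : p < xs.length) (hq : q < xs.length), p ≤ q → xs[p] ≤ xs[q] := by
    intro p q hp hq hpq
    rcases Nat.lt_or_ge p q with h | h
    · exact (List.pairwise_iff_getElem.mp hs) p q hp hq h
    · have : p = q := by omega
      subst this; exact le_refl _
  intro d
  induction d with
  | zero =>
    intro lo hi hd hle hhi hlow hhigh
    simp only [pvCountLessGo]
    have heq : lo = hi := by omega
    refine ⟨by omega, ?_⟩
    intro j hj
    constructor
    · intro hx
      by_contra hcon
      have : x ≤ xs[j] := hhigh j hj (by omega)
      omega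
    · intro hjlo; exact hlow j hj hjlo
  | succ d ih =>
    intro lo hi hd hle hhi hlow hhigh
    simp only [pvCountLessGo]
    by_cases hlt : lo < hi
    · rw [if_pos hlt]
      have hmlen : (lo + hi) / 2 < xs.length := by omega
      have hget : xs.getD ((lo + hi) / 2) 0 = xs[(lo + hi) / 2] :=
        List.getD_eq_getElem xs 0 hmlen
      by_cases hc : xs[(lo + hi) / 2] < x
      · rw [hget, if_pos hc]
        refine ih ((lo + hi) / 2 + 1) hi (by omega) (by omega) hhi ?_ hhigh
        intro j hj hjlt
        have hjle : j ≤ (lo + hi) / 2 := by omega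
        exact lt_of_le_of_lt (hmono j ((lo + hi) / 2) hj hmlen hjle) hc
      · rw [hget, if_neg hc]
        refine ih lo ((lo + hi) / 2) (by omega) (by omega) (by omega) hlow ?_
        intro j hj hjge
        exact le_trans (by omega) (hmono ((lo + hi) / 2) j hmlen hj hjge)
    · rw [if_neg hlt]
      refine ⟨by omega, ?_⟩
      intro j hj
      constructor
      · intro hx
        by_contra hcon
        have : x ≤ xs[j] := hhigh j hj (by omega)
        omega
      · intro hjlo; exact hlow j hj hjlo

-- a predicate true exactly on a prefix of indices has countP equal to the prefix length
theorem countP_eq_of_prefix_iff (p : Int → Bool) :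
    ∀ (xs : List Int) (r : Nat), r ≤ xs.length →
    (∀ j (hj : j < xs.length), p xs[j] ↔ j < r) → xs.countP p = r := by
  intro xs
  induction xs with
  | nil => intro r hr _; simp at hr ⊢; omega
  | cons a t ih =>
    intro r hr hiff
    rw [List.countP_cons]
    match r with
    | 0 =>
      have ha : p a = false := by
        have h0 := hiff 0 (by simp)
        simpa using h0
      have ht : t.countP p = 0 := by
        refine ih 0 (by omega) ?_
        intro j hj
        have hj1 : j + 1 < (a :: t).length := by simp only [List.length_cons]; omega
        have := hiff (j + 1) hj1
        simpa using this
      simp [ha, ht]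
    | s + 1 =>
      have ha : p a = true := by
        have h0 := hiff 0 (by simp)
        simpa using h0
      have ht : t.countP p = s := by
        refine ih s (by simp only [List.length_cons] at hr; omega) ?_
        intro j hj
        have hj1 : j + 1 < (a :: t).length := by simp only [List.length_cons]; omega
        have h2 := hiff (j + 1) hj1
        simp only [List.getElem_cons_succ] at h2
        rw [h2]
        omega
      simp [ha, ht]

-- B's binary search over the sorted copy counts the elements < x of the original list
theorem pvCountLess_sorted_eq_countP (xs : List Int) (x : Int) :
    (pvCountLess (PySem.List.sorted xs (fun e => e) false) x : Int) =
      xs.countP (fun e => decide (e < x)) := by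
  have hp : (PySem.List.sorted xs (fun e => e) false).Pairwise (· ≤ ·) := by
    simpa using PySem.List.sorted_pairwise xs (fun e => e)
  obtain ⟨hle, hiff⟩ :=
    pvCountLessGo_spec (PySem.List.sorted xs (fun e => e) false) x hp
      (PySem.List.sorted xs (fun e => e) false).length 0
      (PySem.List.sorted xs (fun e => e) false).length
      (by omega) (by omega) (le_refl _)
      (by intro j hj h; omega) (by intro j hj h; omega)
  have h1 : (PySem.List.sorted xs (fun e => e) false).countP (fun e => decide (e < x)) =
      pvCountLessGo (PySem.List.sorted xs (fun e => e) false) x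
        (PySem.List.sorted xs (fun e => e) false).length 0
        (PySem.List.sorted xs (fun e => e) false).length := by
    refine countP_eq_of_prefix_iff _ _ _ hle ?_
    intro j hj
    simp only [decide_eq_true_eq]
    exact hiff j hj
  have h2 : (PySem.List.sorted xs (fun e => e) false).countP (fun e => decide (e < x)) =
      xs.countP (fun e => decide (e < x)) :=
    (PySem.List.sorted_perm xs (fun e => e) false).countP_eq _
  have h3 : pvCountLess (PySem.List.sorted xs (fun e => e) false) x =
      pvCountLessGo (PySem.List.sorted xs (fun e => e) false) x
        (PySem.List.sorted xs (fun e => e) false).length 0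
        (PySem.List.sorted xs (fun e => e) false).length := rfl
  rw [h3, ← h1, h2]

-- index-local conditional updates over List.range, pointwise
theorem foldl_range_set (es : Int) (c : Nat → Prop) [DecidablePred c] :
    ∀ (n : Nat) (sz : List Int), n ≤ sz.length →
    ((List.range n).foldl (fun sz k => if c k then sz.set k (sz.getD k 0 + es) else sz) sz).length
      = sz.length ∧
    ∀ k : Nat, k < sz.length →
      ((List.range n).foldl (fun sz k => if c k then sz.set k (sz.getD k 0 + es) else sz) sz).getD k 0
        = if k < n ∧ c k then sz.getD k 0 + es else sz.getD k 0 := by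
  intro n
  induction n with
  | zero => intro sz _; simp
  | succ n ih =>
    intro sz hn
    obtain ⟨ihlen, ihget⟩ := ih sz (by omega)
    rw [List.range_succ, List.foldl_append, List.foldl_cons, List.foldl_nil]
    set R := (List.range n).foldl (fun sz k => if c k then sz.set k (sz.getD k 0 + es) else sz) sz with hR
    have hRlen : R.length = sz.length := ihlen
    have hRn : R.getD n 0 = sz.getD n 0 := by
      rw [ihget n (by omega)]
      simp
    by_cases hcn : c n
    · rw [if_pos hcn]
      refine ⟨by rw [List.length_set]; exact hRlen, ?_⟩
      intro k hk
      have hklen : k < R.length := by omega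
      rw [List.getD_eq_getElem _ 0 (by rw [List.length_set]; omega),
          List.getElem_set]
      by_cases hkn : n = k
      · subst hkn
        rw [hRn]
        simp [hcn]
      · rw [if_neg hkn, ← List.getD_eq_getElem R 0 hklen, ihget k hk]
        by_cases hlt : k < n
        · have h2 : k < n + 1 := by omega
          simp [hlt, h2]
        · have h1 : ¬ k < n + 1 := by omega
          simp [hlt, h1]
    · rw [if_neg hcn]
      refine ⟨ihlen, ?_⟩
      intro k hk
      rw [ihget k hk]
      by_cases hkn : k = n
      · subst hkn; simp [hcn]
      · by_cases hlt : k < n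
        · have : k < n + 1 := by omega
          simp [hlt, this]
        · have h1 : ¬ k < n + 1 := by omega
          simp [hlt, h1]

-- one accumulation pass of A, pointwise
theorem pvAccumPass_getD (galaxies : List (Int × Int)) (sel : (Int × Int) → Int)
    (es elem : Int) (sz : List Int) (h : sz.length = galaxies.length) :
    (pvAccumPass galaxies sel es sz elem).length = galaxies.length ∧
    ∀ k : Nat, k < galaxies.length →
      (pvAccumPass galaxies sel es sz elem).getD k 0 =
        if elem < sel (galaxies.getD k (0, 0)) then sz.getD k 0 + es else sz.getD k 0 := by
  have hrw : pvAccumPass galaxies sel es sz elem =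
      (List.range galaxies.length).foldl
        (fun sz k => if elem < sel (galaxies.getD k (0, 0)) then sz.set k (sz.getD k 0 + es) else sz)
        sz := by
    unfold pvAccumPass
    rw [PySem.List.len_eq, PySem.List.pyRange_one]
    simp [List.foldl_map, gt_iff_lt]
  obtain ⟨hlen, hget⟩ :=
    foldl_range_set es (fun k => elem < sel (galaxies.getD k (0, 0))) galaxies.length sz (by omega)
  rw [hrw]
  refine ⟨by rw [hlen]; omega, ?_⟩
  intro k hk
  rw [hget k (by omega)]
  by_cases hc : elem < sel (galaxies.getD k (0, 0))
  · rw [if_pos ⟨hk, hc⟩, if_pos hc]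
  · rw [if_neg (fun h => hc h.2), if_neg hc]

-- the whole accumulation fold of A, pointwise: a per-element count times expand_size
theorem pvAccumFold_getD (galaxies : List (Int × Int)) (sel : (Int × Int) → Int) (es : Int) :
    ∀ (tev : List Int) (sz : List Int), sz.length = galaxies.length →
    (tev.foldl (pvAccumPass galaxies sel es) sz).length = galaxies.length ∧
    ∀ k : Nat, k < galaxies.length →
      (tev.foldl (pvAccumPass galaxies sel es) sz).getD k 0 =
        sz.getD k 0 + es * tev.countP (fun e => decide (e < sel (galaxies.getD k (0, 0)))) := by
  intro tev
  induction tev with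
  | nil => intro sz h; refine ⟨h, ?_⟩; intro k hk; simp
  | cons e ts ih =>
    intro sz h
    rw [List.foldl_cons]
    obtain ⟨hplen, hpget⟩ := pvAccumPass_getD galaxies sel es e sz h
    obtain ⟨hlen, hget⟩ := ih (pvAccumPass galaxies sel es sz e) hplen
    refine ⟨hlen, ?_⟩
    intro k hk
    rw [hget k hk, hpget k hk, List.countP_cons]
    by_cases hc : e < sel (galaxies.getD k (0, 0))
    · simp only [hc, decide_true, if_true]
      push_cast
      ring
    · simp only [hc, decide_false]
      simp

-- ===== VERDICT (by name: the statement is the Claim_ definition above) =====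
theorem domain_expansion_spec : Claim_equal_domain_expansion := by
  intro galaxies tev teh es _hdom
  show domain_expansion galaxies tev teh es = domain_expansion_alt galaxies tev teh es
  simp only [domain_expansion, domain_expansion_alt]
  obtain ⟨hvlen, hvget⟩ :=
    pvAccumFold_getD galaxies (fun g => g.1) es tev (galaxies.map (fun _ => 0)) (by simp)
  obtain ⟨hhlen, hhget⟩ :=
    pvAccumFold_getD galaxies (fun g => g.2) es teh (galaxies.map (fun _ => 0)) (by simp)
  rw [PySem.List.len_eq, PySem.List.pyRange_one,
      PySem.List.foldl_append_singleton_eq_map]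
  simp only [List.map_map, List.nil_append]
  apply List.ext_getElem
  · simp
  · intro i h1 h2
    have hi : i < galaxies.length := by simpa using h2
    have hzv : (galaxies.map (fun _ => (0 : Int))).getD i 0 = 0 := by
      rw [List.getD_eq_getElem _ 0 (by simpa using hi)]
      simp
    have hgi : galaxies.getD i (0, 0) = galaxies[i] := List.getD_eq_getElem _ _ hi
    simp only [List.getElem_map, List.getElem_range, Function.comp_apply]
    rw [show ((0 : Int) + (i : Int)) = ((i : Int)) by ring]
    simp only [PySem.List.pyGetD_natCast]
    rw [hvget i hi, hhget i hi, hzv, hgi,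
        pvCountLess_sorted_eq_countP tev (galaxies[i].1),
        pvCountLess_sorted_eq_countP teh (galaxies[i].2)]
    simp
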